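-- pv_equiv track=rewrite | github.com/dawoodaijaz97/Leetcode | minimum-jumps-to-reach-end-via-prime-teleportation/solution.py | solve
-- ===== SOURCE A (Python) =====
-- from typing import List
--
-- def is_prime(num: int) -> bool:
--     if num <= 1:
--         return False
--     if num <= 3:
--         return True
--     if num % 2 == 0 or num % 3 == 0:
--         return False
--     i = 5
--     while i * i <= num:
--         if num % i == 0 or num % (i + 2) == 0:
--             return False
--         i += 6
--     return True
--
-- def solve(nums: List[int]) -> int:
--     n = len(nums)
--     primes = {i for i, x in enumerate(nums) if is_prime(x)}
--
--     from collections import deque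
--
--     queue = deque([(0, 0)])  # (current_index, steps)
--     visited = set([0])
--
--     while queue:
--         current_index, steps = queue.popleft()
--
--         if current_index == n - 1:
--             return steps
--
--         for next_index in [current_index + 1, current_index - 1]:
--             if 0 <= next_index < n and next_index not in visited:
--                 visited.add(next_index)
--                 queue.append((next_index, steps + 1))
--
--         if current_index in primes:
--             for i in range(n):
--                 if i != current_index and nums[i] % nums[current_index] == 0 and i not in visited:
--                     visited.add(i)
--                     queue.append((i, steps + 1))
--
--     return -1
-- ===== SOURCE B (Python) =====
-- from typing import List
--
-- def is_prime(num: int) -> bool: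
--     if num <= 1:
--         return False
--     if num <= 3:
--         return True
--     if num % 2 == 0 or num % 3 == 0:
--         return False
--     i = 5
--     while i * i <= num:
--         if num % i == 0 or num % (i + 2) == 0:
--             return False
--         i += 6
--     return True
--
-- def solve(nums: List[int]) -> int:
--     n = len(nums)
--     if n == 0:
--         return -1
--     # Stage 1: one teleport-target list per DISTINCT prime value present in nums.
--     groups = {}
--     for x in nums:
--         if is_prime(x) and x not in groups:
--             groups[x] = [i for i in range(n) if nums[i] % x == 0]
--     # Stage 2: level-synchronized BFS over whole frontiers; a group is
--     # consumed (emptied) the first time any index of its prime value expands.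
--     seen = [False] * n
--     seen[0] = True
--     frontier = [0]
--     steps = 0
--     while frontier:
--         if n - 1 in frontier:
--             return steps
--         nxt = []
--         for cur in frontier:
--             for nb in (cur + 1, cur - 1):
--                 if 0 <= nb < n and not seen[nb]:
--                     seen[nb] = True
--                     nxt.append(nb)
--             g = groups.get(nums[cur])
--             if g is not None:
--                 for i in g:
--                     if not seen[i]:
--                         seen[i] = True
--                         nxt.append(i)
--                 groups[nums[cur]] = []
--         frontier = nxt
--         steps += 1
--     return -1
-- ===== Notes on version B (the rewrite author's own statement) =====
-- stated objective: alternative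
-- what changed: B replaces A's one-pop-at-a-time queue of (index, steps) pairs with a two-stage algorithm: an upfront pass that builds one teleport-target list per distinct prime value of nums, then a level-synchronized BFS that expands a whole frontier per iteration, reads groups instead of re-testing primality, and empties each group the first time it is used, so the array is rescanned at most once per distinct prime value instead of once per popped prime index.
import Mathlib
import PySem

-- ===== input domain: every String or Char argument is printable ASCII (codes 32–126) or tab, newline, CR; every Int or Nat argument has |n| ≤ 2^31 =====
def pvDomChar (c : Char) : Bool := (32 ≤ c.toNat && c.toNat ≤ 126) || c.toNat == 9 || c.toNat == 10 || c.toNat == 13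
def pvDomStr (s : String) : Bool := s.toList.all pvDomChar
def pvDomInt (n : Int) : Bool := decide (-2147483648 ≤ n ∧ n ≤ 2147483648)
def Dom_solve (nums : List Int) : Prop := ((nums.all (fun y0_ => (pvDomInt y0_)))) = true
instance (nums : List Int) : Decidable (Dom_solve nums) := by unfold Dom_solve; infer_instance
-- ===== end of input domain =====

-- B restructures A's one-at-a-time queue BFS into two stages: an upfront pass building one
-- teleport-target list per distinct prime value, then a level-synchronized BFS that expands a
-- whole frontier per iteration and empties each prime group the first time it is used, so the
-- array is never rescanned per popped index; the returned value is identical.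

-- ===== PORT A =====
-- 'while i*i <= num: ... i += 6' of is_prime, ported with fuel; fuel num.toNat is ample
-- (the loop runs at most sqrt(num)/6 + 1 times), and on exhaustion we return like the
-- loop's normal exit (return True), which fuel sufficiency makes unreachable.
def isPrimeLoop : Nat → Int → Int → Bool
  | 0, _, _ => true
  | f + 1, num, i =>
    if i * i ≤ num then
      if PySem.Int.mod num i = 0 ∨ PySem.Int.mod num (i + 2) = 0 then false
      else isPrimeLoop f num (i + 6)
    else true

def is_prime (num : Int) : Bool :=
  if num ≤ 1 then false
  else if num ≤ 3 then true
  else if PySem.Int.mod num 2 = 0 ∨ PySem.Int.mod num 3 = 0 then false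
  else isPrimeLoop num.toNat num 5

-- primes = {i for i, x in enumerate(nums) if is_prime(x)}  (a set, used only for membership)
def primesOf (nums : List Int) : PySem.Set Int :=
  PySem.Set.ofList (((PySem.List.enumerate nums).filter (fun p => is_prime p.2)).map (·.1))

-- the 'while queue:' BFS loop of A, ported with fuel; fuel len(nums)+2 is ample since every
-- enqueue marks a fresh index of [0, n) visited, so the loop pops at most n+1 times.
def bfsA (nums : List Int) (n : Int) (primes : PySem.Set Int) :
    Nat → List (Int × Int) → PySem.Set Int → Int
  | 0, _, _ => -1
  | f + 1, queue, visited =>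
    match queue with
    | [] => -1
    | (cur, steps) :: rest =>
      if cur = n - 1 then steps
      else
        let s1 := [cur + 1, cur - 1].foldl
          (fun (qv : List (Int × Int) × PySem.Set Int) nb =>
            if 0 ≤ nb ∧ nb < n ∧ ¬ qv.2.contains nb then
              (qv.1 ++ [(nb, steps + 1)], qv.2.add nb)
            else qv) (rest, visited)
        let s2 := if primes.contains cur then
            (PySem.List.pyRange 0 n 1).foldl
              (fun (qv : List (Int × Int) × PySem.Set Int) i =>
                if i ≠ cur ∧ PySem.Int.mod (PySem.List.pyGetD nums i 0) (PySem.List.pyGetD nums cur 0) = 0 ∧ ¬ qv.2.contains i then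
                  (qv.1 ++ [(i, steps + 1)], qv.2.add i)
                else qv) s1
          else s1
        bfsA nums n primes f s2.1 s2.2

def solve (nums : List Int) : Int :=
  bfsA nums (nums.length : Int) (primesOf nums) (nums.length + 2) [(0, 0)] (PySem.Set.ofList [0])

-- ===== PORT B =====
-- '[i for i in range(n) if nums[i] % x == 0]' (indices in range, so pyGetD is exact)
def tgtList (nums : List Int) (n v : Int) : List Int :=
  (PySem.List.pyRange 0 n 1).filter
    (fun i => decide (PySem.Int.mod (PySem.List.pyGetD nums i 0) v = 0))

-- stage 1: 'for x in nums: if is_prime(x) and x not in groups: groups[x] = [...]'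
def buildGroups (nums : List Int) (n : Int) : PySem.Dict Int (List Int) :=
  nums.foldl
    (fun γ x => if is_prime x ∧ γ.get? x = none then γ.insert x (tgtList nums n x) else γ)
    PySem.Dict.empty

-- the body of 'for cur in frontier': two ±1 neighbours, then 'g = groups.get(nums[cur])'
-- ('None' = Lean's 'none'); the group is walked and emptied when present.
def stepCur (nums : List Int) (n : Int)
    (st : List Int × List Bool × PySem.Dict Int (List Int)) (cur : Int) :
    List Int × List Bool × PySem.Dict Int (List Int) :=
  let s1 := [cur + 1, cur - 1].foldl
    (fun (s : List Int × List Bool) nb =>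
      if 0 ≤ nb ∧ nb < n ∧ ¬ PySem.List.pyGetD s.2 nb false then
        (s.1 ++ [nb], PySem.List.pySetD s.2 nb true)
      else s) (st.1, st.2.1)
  match st.2.2.get? (PySem.List.pyGetD nums cur 0) with
  | none => (s1.1, s1.2, st.2.2)
  | some g =>
    let s2 := g.foldl
      (fun (s : List Int × List Bool) i =>
        if ¬ PySem.List.pyGetD s.2 i false then (s.1 ++ [i], PySem.List.pySetD s.2 i true)
        else s) s1
    (s2.1, s2.2, st.2.2.insert (PySem.List.pyGetD nums cur 0) [])

-- stage 2: 'while frontier:' level loop, fuel len(nums)+2 is ample (each non-final level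
-- marks at least one fresh index seen)
def bfsLvl (nums : List Int) (n : Int) :
    Nat → List Int → Int → List Bool → PySem.Dict Int (List Int) → Int
  | 0, _, _, _, _ => -1
  | f + 1, F, steps, seen, γ =>
    match F with
    | [] => -1
    | _ :: _ =>
      if (n - 1) ∈ F then steps
      else
        let s := F.foldl (stepCur nums n) (([] : List Int), seen, γ)
        bfsLvl nums n f s.1 (steps + 1) s.2.1 s.2.2

def solve_alt (nums : List Int) : Int :=
  if nums.length = 0 then -1
  else
    bfsLvl nums (nums.length : Int) (nums.length + 2) [0] 0
      (PySem.List.pySetD (List.replicate nums.length false) 0 true)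
      (buildGroups nums (nums.length : Int))

-- ===== PRECONDITION & SPEC =====
def Spec_solve (nums : List Int) (out : Int) : Prop := out = solve_alt nums
instance (nums : List Int) (out : Int) : Decidable (Spec_solve nums out) := by unfold Spec_solve; infer_instance

-- ===== CLAIM (what is proved, stated in full; the proofs are below) =====
def Claim_equal_solve : Prop := ∀ (nums : List Int), Dom_solve nums → Spec_solve nums (solve nums)

-- ===== LEMMAS AND PROOFS =====

-- relation between A's visited set and B's seen array (plus the set's well-formedness)
def RelVS (nums : List Int) (vis : PySem.Set Int) (seen : List Bool) : Prop :=
  seen.length = nums.length ∧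
  (∀ j : Int, 0 ≤ j → j < (nums.length : Int) → vis.contains j = PySem.List.pyGetD seen j false) ∧
  vis.Nodup ∧ (∀ x ∈ vis, 0 ≤ x ∧ x < (nums.length : Int))

-- B's group table: each prime value of nums has its full target list, or [] once all
-- of its targets are seen
def GInvP (nums : List Int) (seen : List Bool) (γ : PySem.Dict Int (List Int)) : Prop :=
  (∀ (v : Int) (l : List Int), γ.get? v = some l → is_prime v = true) ∧
  ∀ v : Int, is_prime v = true → v ∈ nums →
    ∃ l, γ.get? v = some l ∧
      (l = tgtList nums (nums.length : Int) v ∨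
       (l = [] ∧ ∀ i ∈ tgtList nums (nums.length : Int) v, PySem.List.pyGetD seen i false = true))

lemma contains_add_eq (s : PySem.Set Int) (x y : Int) :
    (s.add x).contains y = (s.contains y || decide (y = x)) := by
  simp only [PySem.Set.add, PySem.Set.contains]
  by_cases hc : List.contains s x = true
  · simp only [hc, if_true]
    by_cases hyx : y = x
    · subst hyx; simp only [decide_true, Bool.or_true]; exact hc
    · simp [hyx]
  · simp only [hc]
    by_cases hyx : y = x <;> simp [hyx]

lemma getD_set (seen : List Bool) (i j : Int) (h0 : 0 ≤ i) (hi : i < (seen.length : Int))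
    (hj : 0 ≤ j) :
    PySem.List.pyGetD (PySem.List.pySetD seen i true) j false
      = if j = i then true else PySem.List.pyGetD seen j false := by
  have hi' : i.toNat < seen.length := by omega
  have e1 : i = ((i.toNat : Nat) : Int) := by omega
  have e2 : j = ((j.toNat : Nat) : Int) := by omega
  rw [e1, e2, PySem.List.pyGetD_pySetD_natCast _ _ _ _ _ hi']
  by_cases h : j.toNat = i.toNat
  · simp [h]
  · simp [h]
    omega

lemma vis_le (nums : List Int) (vis : PySem.Set Int) (seen : List Bool)
    (hR : RelVS nums vis seen) : vis.length ≤ nums.length := by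
  obtain ⟨-, -, hnd, hrange⟩ := hR
  have hsub : vis ⊆ PySem.List.pyRange 0 (nums.length : Int) 1 := by
    intro x hx
    obtain ⟨h1, h2⟩ := hrange x hx
    exact PySem.List.mem_pyRange_one.mpr ⟨h1, h2⟩
  have := (hnd.subperm hsub).length_le
  rwa [PySem.List.length_pyRange_one, show ((nums.length : Int) - 0).toNat = nums.length by omega] at this

lemma mark (nums : List Int) (vis : PySem.Set Int) (seen : List Bool) (i : Int)
    (hR : RelVS nums vis seen) (h0 : 0 ≤ i) (hlt : i < (nums.length : Int))
    (hnew : ¬ vis.contains i = true) :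
    RelVS nums (vis.add i) (PySem.List.pySetD seen i true) ∧
    (∀ j : Int, vis.contains j = true → (vis.add i).contains j = true) ∧
    (vis.add i).contains i = true ∧
    (vis.add i).length = vis.length + 1 := by
  obtain ⟨hlen, hptw, hnd, hrange⟩ := hR
  have hadd : vis.add i = vis ++ [i] := by
    simp only [PySem.Set.add]
    rw [if_neg hnew]
  have hnotmem : i ∉ vis := by
    intro hmem
    exact hnew (by simpa [PySem.Set.contains] using hmem)
  refine ⟨⟨by rw [PySem.List.length_pySetD]; exact hlen, ?_, ?_, ?_⟩, ?_, ?_, ?_⟩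
  · intro j hj0 hjlt
    rw [contains_add_eq, getD_set seen i j h0 (by rw [hlen]; exact hlt) hj0]
    by_cases hji : j = i
    · simp [hji]
    · simp only [hji, decide_false, Bool.or_false, if_false]
      exact hptw j hj0 hjlt
  · rw [hadd]
    exact hnd.append (List.nodup_singleton i) (by simpa using hnotmem)
  · intro x hx
    rw [hadd] at hx
    rcases List.mem_append.mp hx with h | h
    · exact hrange x h
    · rcases List.mem_singleton.mp h with rfl
      exact ⟨h0, hlt⟩
  · intro j hj; rw [contains_add_eq, hj]; simp
  · rw [contains_add_eq]; simp
  · rw [hadd, List.length_append, List.length_singleton]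

-- one '±1 neighbour' if of A matched with the same if of B
lemma mark_step (nums : List Int) (steps nb : Int) (qA : List (Int × Int)) (acc : List Int)
    (vis : PySem.Set Int) (seen : List Bool) (hR : RelVS nums vis seen) :
    ∃ (L : List Int) (vis' : PySem.Set Int) (seen' : List Bool),
      (if 0 ≤ nb ∧ nb < (nums.length : Int) ∧ ¬ vis.contains nb = true then
          (qA ++ [(nb, steps + 1)], vis.add nb) else (qA, vis))
        = (qA ++ L.map (fun c => (c, steps + 1)), vis') ∧
      (if 0 ≤ nb ∧ nb < (nums.length : Int) ∧ ¬ PySem.List.pyGetD seen nb false = true then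
          (acc ++ [nb], PySem.List.pySetD seen nb true) else (acc, seen))
        = (acc ++ L, seen') ∧
      RelVS nums vis' seen' ∧
      (∀ j : Int, vis.contains j = true → vis'.contains j = true) ∧
      (∀ c ∈ L, 0 ≤ c ∧ c < (nums.length : Int) ∧ vis'.contains c = true) ∧
      vis'.length = vis.length + L.length := by
  have hiff : (0 ≤ nb ∧ nb < (nums.length : Int) ∧ ¬ vis.contains nb = true)
      ↔ (0 ≤ nb ∧ nb < (nums.length : Int) ∧ ¬ PySem.List.pyGetD seen nb false = true) := by
    obtain ⟨-, hptw, -, -⟩ := hR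
    constructor
    · rintro ⟨a, b, c⟩; exact ⟨a, b, by rw [← hptw nb a b]; exact c⟩
    · rintro ⟨a, b, c⟩; exact ⟨a, b, by rw [hptw nb a b]; exact c⟩
  by_cases hca : 0 ≤ nb ∧ nb < (nums.length : Int) ∧ ¬ vis.contains nb = true
  · obtain ⟨h0, h1, h2⟩ := hca
    obtain ⟨hR', hmono, hself, hlen⟩ := mark nums vis seen nb hR h0 h1 h2
    refine ⟨[nb], vis.add nb, PySem.List.pySetD seen nb true,
      by rw [if_pos ⟨h0, h1, h2⟩]; rfl, by rw [if_pos (hiff.mp ⟨h0, h1, h2⟩)],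
      hR', hmono, ?_, by rw [hlen]; rfl⟩
    intro c hc
    rcases List.mem_singleton.mp hc with rfl
    exact ⟨h0, h1, hself⟩
  · exact ⟨[], vis, seen, by rw [if_neg hca]; simp,
      by rw [if_neg (fun c => hca (hiff.mpr c))]; simp,
      hR, fun _ h => h, by simp, by simp⟩

-- A's teleport scan over range(n) matched with B's walk of the full target list
lemma tele (nums : List Int) (cur steps : Int) :
    ∀ (l : List Int) (qA : List (Int × Int)) (acc : List Int) (vis : PySem.Set Int)
      (seen : List Bool),
    RelVS nums vis seen → vis.contains cur = true →
    (∀ i ∈ l, 0 ≤ i ∧ i < (nums.length : Int)) →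
    ∃ (L : List Int) (vis' : PySem.Set Int) (seen' : List Bool),
      l.foldl (fun (qv : List (Int × Int) × PySem.Set Int) i =>
          if i ≠ cur ∧ PySem.Int.mod (PySem.List.pyGetD nums i 0) (PySem.List.pyGetD nums cur 0) = 0 ∧ ¬ qv.2.contains i then
            (qv.1 ++ [(i, steps + 1)], qv.2.add i)
          else qv) (qA, vis)
        = (qA ++ L.map (fun c => (c, steps + 1)), vis') ∧
      (l.filter (fun i => decide (PySem.Int.mod (PySem.List.pyGetD nums i 0) (PySem.List.pyGetD nums cur 0) = 0))).foldl
          (fun (s : List Int × List Bool) i =>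
            if ¬ PySem.List.pyGetD s.2 i false then (s.1 ++ [i], PySem.List.pySetD s.2 i true)
            else s) (acc, seen)
        = (acc ++ L, seen') ∧
      RelVS nums vis' seen' ∧
      (∀ j : Int, vis.contains j = true → vis'.contains j = true) ∧
      (∀ c ∈ L, 0 ≤ c ∧ c < (nums.length : Int) ∧ vis'.contains c = true) ∧
      vis'.length = vis.length + L.length ∧
      (∀ i ∈ l, PySem.Int.mod (PySem.List.pyGetD nums i 0) (PySem.List.pyGetD nums cur 0) = 0 →
        vis'.contains i = true) := by
  intro l
  induction l with
  | nil =>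
    intro qA acc vis seen hR hcur _
    exact ⟨[], vis, seen, by simp, by simp, hR, fun _ h => h, by simp, by simp, by simp⟩
  | cons i l ih =>
    intro qA acc vis seen hR hcur hl
    obtain ⟨hi0, hilt⟩ := hl i (by simp)
    have hl' : ∀ x ∈ l, 0 ≤ x ∧ x < (nums.length : Int) := fun x hx => hl x (by simp [hx])
    by_cases hm : PySem.Int.mod (PySem.List.pyGetD nums i 0) (PySem.List.pyGetD nums cur 0) = 0
    · have hfil : (i :: l).filter (fun i => decide (PySem.Int.mod (PySem.List.pyGetD nums i 0) (PySem.List.pyGetD nums cur 0) = 0))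
          = i :: l.filter (fun i => decide (PySem.Int.mod (PySem.List.pyGetD nums i 0) (PySem.List.pyGetD nums cur 0) = 0)) := by
        simp [hm]
      rw [hfil]
      by_cases hvi : vis.contains i = true
      · have hseeni : PySem.List.pyGetD seen i false = true := by
          obtain ⟨-, hptw, -, -⟩ := hR
          rw [← hptw i hi0 hilt]; exact hvi
        simp only [List.foldl_cons]
        rw [if_neg (by rintro ⟨_, _, hno⟩; exact hno hvi),
            if_neg (by intro hno; exact hno hseeni)]
        obtain ⟨L, vis', seen', hA, hB, h1, h2, h3, h4, h5⟩ := ih qA acc vis seen hR hcur hl'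
        exact ⟨L, vis', seen', hA, hB, h1, h2, h3, h4, fun j hj hjm => by
          rcases List.mem_cons.mp hj with rfl | hj'
          · exact h2 j hvi
          · exact h5 j hj' hjm⟩
      · by_cases hic : i = cur
        · exact absurd (hic ▸ hcur) hvi
        have hseeni : ¬ PySem.List.pyGetD seen i false = true := by
          obtain ⟨-, hptw, -, -⟩ := hR
          rw [← hptw i hi0 hilt]; exact hvi
        obtain ⟨hR', hmono, hconti, hlen1⟩ := mark nums vis seen i hR hi0 hilt hvi
        have hcur' : (vis.add i).contains cur = true := hmono cur hcur
        obtain ⟨L, vis', seen', hA, hB, h1, h2, h3, h4, h5⟩ :=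
          ih (qA ++ [(i, steps + 1)]) (acc ++ [i]) (vis.add i)
            (PySem.List.pySetD seen i true) hR' hcur' hl'
        refine ⟨i :: L, vis', seen', ?_, ?_, h1, fun j hj => h2 j (hmono j hj), ?_, ?_, ?_⟩
        · simp only [List.foldl_cons]
          rw [if_pos ⟨hic, hm, hvi⟩, hA, List.map_cons, List.append_assoc]
          rfl
        · simp only [List.foldl_cons]
          rw [if_pos hseeni, hB, List.append_assoc]
          rfl
        · intro c hc
          rcases List.mem_cons.mp hc with hci | hc'
          · exact hci ▸ ⟨hi0, hilt, h2 i hconti⟩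
          · exact h3 c hc'
        · rw [h4, hlen1, List.length_cons]; omega
        · intro j hj hjm
          rcases List.mem_cons.mp hj with hji | hj'
          · exact hji ▸ h2 i hconti
          · exact h5 j hj' hjm
    · have hfil : (i :: l).filter (fun i => decide (PySem.Int.mod (PySem.List.pyGetD nums i 0) (PySem.List.pyGetD nums cur 0) = 0))
          = l.filter (fun i => decide (PySem.Int.mod (PySem.List.pyGetD nums i 0) (PySem.List.pyGetD nums cur 0) = 0)) := by
        simp [hm]
      rw [hfil]
      simp only [List.foldl_cons]
      rw [if_neg (by rintro ⟨_, hno, _⟩; exact hm hno)]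
      obtain ⟨L, vis', seen', hA, hB, h1, h2, h3, h4, h5⟩ := ih qA acc vis seen hR hcur hl'
      exact ⟨L, vis', seen', hA, hB, h1, h2, h3, h4, fun j hj hjm => by
        rcases List.mem_cons.mp hj with rfl | hj'
        · exact absurd hjm hm
        · exact h5 j hj' hjm⟩

-- A's teleport scan adds nothing once every target is already visited
lemma tele_cleared (nums : List Int) (cur steps : Int) (qA : List (Int × Int))
    (vis : PySem.Set Int)
    (hall : ∀ i ∈ tgtList nums (nums.length : Int) (PySem.List.pyGetD nums cur 0),
      vis.contains i = true) :
    (PySem.List.pyRange 0 (nums.length : Int) 1).foldl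
        (fun (qv : List (Int × Int) × PySem.Set Int) i =>
          if i ≠ cur ∧ PySem.Int.mod (PySem.List.pyGetD nums i 0) (PySem.List.pyGetD nums cur 0) = 0 ∧ ¬ qv.2.contains i then
            (qv.1 ++ [(i, steps + 1)], qv.2.add i)
          else qv) (qA, vis) = (qA, vis) := by
  have hfalse : ∀ i ∈ PySem.List.pyRange 0 (nums.length : Int) 1,
      ¬ (i ≠ cur ∧ PySem.Int.mod (PySem.List.pyGetD nums i 0) (PySem.List.pyGetD nums cur 0) = 0 ∧ ¬ vis.contains i = true) := by
    rintro i hi ⟨-, hm, hnv⟩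
    exact hnv (hall i (List.mem_filter.mpr ⟨hi, by simpa using hm⟩))
  generalize PySem.List.pyRange 0 (nums.length : Int) 1 = l at hfalse ⊢
  induction l with
  | nil => rfl
  | cons i l ih =>
    simp only [List.foldl_cons]
    rw [if_neg (hfalse i (by simp))]
    exact ih (fun j hj => hfalse j (by simp [hj]))

lemma primes_spec (nums : List Int) (cur : Int) (h0 : 0 ≤ cur) (hlt : cur < (nums.length : Int)) :
    (primesOf nums).contains cur = is_prime (PySem.List.pyGetD nums cur 0) := by
  have hc : cur.toNat < nums.length := by omega
  have hg : PySem.List.pyGetD nums cur 0 = nums[cur.toNat] :=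
    PySem.List.pyGetD_eq_getElem nums 0 h0 hlt
  rw [hg, Bool.eq_iff_iff]
  simp only [primesOf, PySem.Set.contains, List.contains_eq_mem, decide_eq_true_eq,
    PySem.Set.mem_ofList, List.mem_map, List.mem_filter, PySem.List.mem_enumerate_iff]
  constructor
  · rintro ⟨p, ⟨⟨k, hk, rfl⟩, hpr⟩, h1⟩
    simp only [] at h1 hpr
    have : k = cur.toNat := by omega
    subst this; exact hpr
  · intro h
    refine ⟨(0 + (cur.toNat : Int), nums[cur.toNat]), ⟨⟨cur.toNat, hc, rfl⟩, h⟩, by omega⟩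

lemma GInvP_mono (nums : List Int) (seen seen' : List Bool) (γ : PySem.Dict Int (List Int))
    (vis vis' : PySem.Set Int) (hR : RelVS nums vis seen) (hR' : RelVS nums vis' seen')
    (hmono : ∀ j : Int, vis.contains j = true → vis'.contains j = true)
    (hG : GInvP nums seen γ) : GInvP nums seen' γ := by
  refine ⟨hG.1, ?_⟩
  intro v hv hvmem
  obtain ⟨l, hget, hcase⟩ := hG.2 v hv hvmem
  refine ⟨l, hget, ?_⟩
  rcases hcase with h | ⟨hnil, hall⟩
  · exact Or.inl h
  · refine Or.inr ⟨hnil, fun i hi => ?_⟩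
    have hrange := List.mem_filter.mp hi
    obtain ⟨hi0, hilt⟩ := PySem.List.mem_pyRange_one.mp hrange.1
    obtain ⟨-, hptw, -, -⟩ := hR
    obtain ⟨-, hptw', -, -⟩ := hR'
    rw [← hptw' i hi0 hilt]
    exact hmono i (by rw [hptw i hi0 hilt]; exact hall i hi)

-- processing one frontier element: A's pop body equals B's stepCur, same appended indices
lemma step_eq (nums : List Int) (d cur : Int) (Q : List (Int × Int)) (acc : List Int)
    (vis : PySem.Set Int) (seen : List Bool) (γ : PySem.Dict Int (List Int))
    (hR : RelVS nums vis seen) (hG : GInvP nums seen γ)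
    (hc0 : 0 ≤ cur) (hclt : cur < (nums.length : Int)) (hcv : vis.contains cur = true) :
    ∃ (L : List Int) (vis' : PySem.Set Int) (seen' : List Bool),
      (let s1 := [cur + 1, cur - 1].foldl
          (fun (qv : List (Int × Int) × PySem.Set Int) nb =>
            if 0 ≤ nb ∧ nb < (nums.length : Int) ∧ ¬ qv.2.contains nb then
              (qv.1 ++ [(nb, d + 1)], qv.2.add nb)
            else qv) (Q, vis)
        if (primesOf nums).contains cur then
          (PySem.List.pyRange 0 (nums.length : Int) 1).foldl
            (fun (qv : List (Int × Int) × PySem.Set Int) i =>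
              if i ≠ cur ∧ PySem.Int.mod (PySem.List.pyGetD nums i 0) (PySem.List.pyGetD nums cur 0) = 0 ∧ ¬ qv.2.contains i then
                (qv.1 ++ [(i, d + 1)], qv.2.add i)
              else qv) s1
        else s1)
        = (Q ++ L.map (fun c => (c, d + 1)), vis') ∧
      stepCur nums (nums.length : Int) (acc, seen, γ) cur
        = (acc ++ L, seen',
            if is_prime (PySem.List.pyGetD nums cur 0) then
              γ.insert (PySem.List.pyGetD nums cur 0) [] else γ) ∧
      RelVS nums vis' seen' ∧
      GInvP nums seen'
        (if is_prime (PySem.List.pyGetD nums cur 0) then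
          γ.insert (PySem.List.pyGetD nums cur 0) [] else γ) ∧
      (∀ j : Int, vis.contains j = true → vis'.contains j = true) ∧
      (∀ c ∈ L, 0 ≤ c ∧ c < (nums.length : Int) ∧ vis'.contains c = true) ∧
      vis'.length = vis.length + L.length := by
  obtain ⟨L1, vis1, seen1, hA1, hB1, hR1, hm1, hL1, hl1⟩ :=
    mark_step nums d (cur + 1) Q acc vis seen hR
  obtain ⟨L2, vis2, seen2, hA2, hB2, hR2, hm2, hL2, hl2⟩ :=
    mark_step nums d (cur - 1) (Q ++ L1.map (fun c => (c, d + 1))) (acc ++ L1) vis1 seen1 hR1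
  have hcv2 : vis2.contains cur = true := hm2 _ (hm1 _ hcv)
  have hAnbr : [cur + 1, cur - 1].foldl
      (fun (qv : List (Int × Int) × PySem.Set Int) nb =>
        if 0 ≤ nb ∧ nb < (nums.length : Int) ∧ ¬ qv.2.contains nb then
          (qv.1 ++ [(nb, d + 1)], qv.2.add nb)
        else qv) (Q, vis)
      = (Q ++ (L1 ++ L2).map (fun c => (c, d + 1)), vis2) := by
    simp only [List.foldl_cons, List.foldl_nil]
    rw [hA1, hA2, List.map_append, List.append_assoc]
  have hBnbr : [cur + 1, cur - 1].foldl
      (fun (s : List Int × List Bool) nb =>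
        if 0 ≤ nb ∧ nb < (nums.length : Int) ∧ ¬ PySem.List.pyGetD s.2 nb false then
          (s.1 ++ [nb], PySem.List.pySetD s.2 nb true)
        else s) (acc, seen)
      = (acc ++ (L1 ++ L2), seen2) := by
    simp only [List.foldl_cons, List.foldl_nil]
    rw [hB1, hB2, List.append_assoc]
  have hps := primes_spec nums cur hc0 hclt
  by_cases hp : is_prime (PySem.List.pyGetD nums cur 0) = true
  · -- teleport case
    obtain ⟨l, hget, hcase⟩ := hG.2 (PySem.List.pyGetD nums cur 0) hp
      (by
        have : PySem.List.pyGetD nums cur 0 = nums[cur.toNat] :=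
          PySem.List.pyGetD_eq_getElem nums 0 hc0 hclt
        rw [this]; exact List.getElem_mem _)
    rcases hcase with hfull | ⟨hnil, hall⟩
    · -- group still full: both walk the whole target list
      obtain ⟨L3, vis3, seen3, hA3, hB3, hR3, hm3, hL3, hl3, hdone⟩ :=
        tele nums cur d (PySem.List.pyRange 0 (nums.length : Int) 1)
          (Q ++ (L1 ++ L2).map (fun c => (c, d + 1))) (acc ++ (L1 ++ L2)) vis2 seen2 hR2 hcv2
          (by intro i hi; exact PySem.List.mem_pyRange_one.mp hi)
      refine ⟨L1 ++ L2 ++ L3, vis3, seen3, ?_, ?_, hR3, ?_, ?_, ?_, ?_⟩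
      · simp only []
        rw [hAnbr, if_pos (by rw [hps]; exact hp), hA3]
        simp [List.map_append, List.append_assoc]
      · simp only [stepCur]
        rw [hBnbr, hget]
        simp only [hfull, tgtList]
        rw [hB3]
        simp [List.append_assoc, hp]
      · rw [if_pos hp]
        refine ⟨?_, ?_⟩
        · intro w lw hwl
          rw [PySem.Dict.get?_insert] at hwl
          by_cases hwv : w = PySem.List.pyGetD nums cur 0
          · exact hwv ▸ hp
          · rw [if_neg hwv] at hwl
            exact hG.1 w lw hwl
        intro w hw hwm
        by_cases hwv : w = PySem.List.pyGetD nums cur 0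
        · subst hwv
          refine ⟨[], by rw [PySem.Dict.get?_insert_self], Or.inr ⟨rfl, ?_⟩⟩
          intro i hi
          have hrange := List.mem_filter.mp hi
          obtain ⟨hi0, hilt⟩ := PySem.List.mem_pyRange_one.mp hrange.1
          obtain ⟨-, hptw3, -, -⟩ := hR3
          rw [← hptw3 i hi0 hilt]
          exact hdone i hrange.1 (by simpa using hrange.2)
        · obtain ⟨lw, hgetw, hcw⟩ := hG.2 w hw hwm
          refine ⟨lw, by rw [PySem.Dict.get?_insert_of_ne γ _ hwv]; exact hgetw, ?_⟩
          rcases hcw with h | ⟨h1, h2⟩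
          · exact Or.inl h
          · refine Or.inr ⟨h1, fun i hi => ?_⟩
            have hrange := List.mem_filter.mp hi
            obtain ⟨hi0, hilt⟩ := PySem.List.mem_pyRange_one.mp hrange.1
            obtain ⟨-, hptw, -, -⟩ := hR
            obtain ⟨-, hptw3, -, -⟩ := hR3
            rw [← hptw3 i hi0 hilt]
            exact hm3 i (hm2 i (hm1 i (by rw [hptw i hi0 hilt]; exact h2 i hi)))
      · exact fun j hj => hm3 j (hm2 j (hm1 j hj))
      · intro c hc
        rcases List.mem_append.mp hc with h12 | h3
        · rcases List.mem_append.mp h12 with h1 | h2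
          · obtain ⟨a, b, c'⟩ := hL1 c h1
            exact ⟨a, b, hm3 c (hm2 c c')⟩
          · obtain ⟨a, b, c'⟩ := hL2 c h2
            exact ⟨a, b, hm3 c c'⟩
        · exact hL3 c h3
      · rw [hl3, hl2, hl1]; simp; omega
    · -- group already consumed: A's rescan adds nothing, B walks []
      have hall2 : ∀ i ∈ tgtList nums (nums.length : Int) (PySem.List.pyGetD nums cur 0),
          vis2.contains i = true := by
        intro i hi
        have hrange := List.mem_filter.mp hi
        obtain ⟨hi0, hilt⟩ := PySem.List.mem_pyRange_one.mp hrange.1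
        obtain ⟨-, hptw, -, -⟩ := hR
        exact hm2 i (hm1 i (by rw [hptw i hi0 hilt]; exact hall i hi))
      refine ⟨L1 ++ L2, vis2, seen2, ?_, ?_, hR2, ?_, fun j hj => hm2 j (hm1 j hj), ?_, ?_⟩
      · simp only []
        rw [hAnbr, if_pos (by rw [hps]; exact hp),
          tele_cleared nums cur d _ vis2 hall2]
      · simp only [stepCur]
        rw [hBnbr, hget]
        simp only [hnil, List.foldl_nil]
        simp [hp]
      · rw [if_pos hp]
        refine ⟨?_, ?_⟩
        · intro w lw hwl
          rw [PySem.Dict.get?_insert] at hwl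
          by_cases hwv : w = PySem.List.pyGetD nums cur 0
          · exact hwv ▸ hp
          · rw [if_neg hwv] at hwl
            exact hG.1 w lw hwl
        intro w hw hwm
        by_cases hwv : w = PySem.List.pyGetD nums cur 0
        · subst hwv
          refine ⟨[], by rw [PySem.Dict.get?_insert_self], Or.inr ⟨rfl, ?_⟩⟩
          intro i hi
          have hrange := List.mem_filter.mp hi
          obtain ⟨hi0, hilt⟩ := PySem.List.mem_pyRange_one.mp hrange.1
          obtain ⟨-, hptw2, -, -⟩ := hR2
          rw [← hptw2 i hi0 hilt]
          exact hall2 i hi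
        · obtain ⟨lw, hgetw, hcw⟩ := hG.2 w hw hwm
          refine ⟨lw, by rw [PySem.Dict.get?_insert_of_ne γ _ hwv]; exact hgetw, ?_⟩
          rcases hcw with h | ⟨h1, h2⟩
          · exact Or.inl h
          · refine Or.inr ⟨h1, fun i hi => ?_⟩
            have hrange := List.mem_filter.mp hi
            obtain ⟨hi0, hilt⟩ := PySem.List.mem_pyRange_one.mp hrange.1
            obtain ⟨-, hptw, -, -⟩ := hR
            obtain ⟨-, hptw2, -, -⟩ := hR2
            rw [← hptw2 i hi0 hilt]
            exact hm2 i (hm1 i (by rw [hptw i hi0 hilt]; exact h2 i hi))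
      · intro c hc
        rcases List.mem_append.mp hc with h1 | h2
        · obtain ⟨a, b, c'⟩ := hL1 c h1
          exact ⟨a, b, hm2 c c'⟩
        · exact hL2 c h2
      · rw [hl2, hl1]; simp; omega
  · -- non-prime case
    have hp' : is_prime (PySem.List.pyGetD nums cur 0) = false := by
      simpa using hp
    refine ⟨L1 ++ L2, vis2, seen2, ?_, ?_, hR2, ?_, fun j hj => hm2 j (hm1 j hj), ?_, ?_⟩
    · simp only []
      rw [hAnbr, if_neg (by rw [hps, hp']; simp)]
    · have hnone : γ.get? (PySem.List.pyGetD nums cur 0) = none := by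
        cases h : γ.get? (PySem.List.pyGetD nums cur 0) with
        | none => rfl
        | some lw => exact absurd (hG.1 _ lw h) (by rw [hp']; simp)
      simp only [stepCur]
      rw [hBnbr, hnone, if_neg (by rw [hp']; simp)]
    · rw [if_neg (by rw [hp']; simp)]
      exact GInvP_mono nums seen seen2 γ vis vis2 hR hR2 (fun j hj => hm2 j (hm1 j hj)) hG
    · intro c hc
      rcases List.mem_append.mp hc with h1 | h2
      · obtain ⟨a, b, c'⟩ := hL1 c h1
        exact ⟨a, b, hm2 c c'⟩
      · exact hL2 c h2
    · rw [hl2, hl1]; simp; omega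

-- a whole level: A consuming F one pop at a time equals B folding stepCur over F
lemma level (nums : List Int) (d : Int) :
    ∀ (F : List Int) (g : Nat) (qrest : List (Int × Int)) (acc : List Int)
      (vis : PySem.Set Int) (seen : List Bool) (γ : PySem.Dict Int (List Int)),
    RelVS nums vis seen → GInvP nums seen γ →
    (∀ c ∈ F, 0 ≤ c ∧ c < (nums.length : Int) ∧ vis.contains c = true) →
    ((nums.length : Int) - 1) ∉ F →
    ∃ (L : List Int) (vis' : PySem.Set Int) (seen' : List Bool) (γ' : PySem.Dict Int (List Int)),
      bfsA nums (nums.length : Int) (primesOf nums) (F.length + g)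
          (F.map (fun c => (c, d)) ++ qrest) vis
        = bfsA nums (nums.length : Int) (primesOf nums) g
            (qrest ++ L.map (fun c => (c, d + 1))) vis' ∧
      F.foldl (stepCur nums (nums.length : Int)) (acc, seen, γ) = (acc ++ L, seen', γ') ∧
      RelVS nums vis' seen' ∧ GInvP nums seen' γ' ∧
      (∀ j : Int, vis.contains j = true → vis'.contains j = true) ∧
      (∀ c ∈ L, 0 ≤ c ∧ c < (nums.length : Int) ∧ vis'.contains c = true) ∧
      vis'.length = vis.length + L.length := by
  intro F
  induction F with
  | nil =>
    intro g qrest acc vis seen γ hR hG _ _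
    exact ⟨[], vis, seen, γ, by simp, by simp, hR, hG, fun _ h => h, by simp, by simp⟩
  | cons c F' ih =>
    intro g qrest acc vis seen γ hR hG hF hnm
    obtain ⟨hc0, hclt, hcv⟩ := hF c (by simp)
    have hcne : ¬ c = (nums.length : Int) - 1 := fun h => hnm (by simp [h])
    have hfuel : (c :: F').length + g = (F'.length + g) + 1 := by
      simp only [List.length_cons]; omega
    obtain ⟨Lc, vis1, seen1, hAeq, hBeq, hR1, hG1, hm1, hLc, hlc⟩ :=
      step_eq nums d c (F'.map (fun x => (x, d)) ++ qrest) acc vis seen γ hR hG hc0 hclt hcv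
    obtain ⟨L', vis', seen', γ', hA', hB', hR', hG', hm', hL', hl'⟩ :=
      ih g (qrest ++ Lc.map (fun x => (x, d + 1))) (acc ++ Lc) vis1 seen1
        (if is_prime (PySem.List.pyGetD nums c 0) then
          γ.insert (PySem.List.pyGetD nums c 0) [] else γ)
        hR1 hG1
        (fun x hx => by
          obtain ⟨a, b, cc⟩ := hF x (by simp [hx])
          exact ⟨a, b, hm1 x cc⟩)
        (fun h => hnm (by simp [h]))
    refine ⟨Lc ++ L', vis', seen', γ', ?_, ?_, hR', hG', fun j hj => hm' j (hm1 j hj), ?_, ?_⟩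
    · rw [hfuel]
      simp only [List.map_cons, List.cons_append, bfsA]
      rw [if_neg hcne]
      rw [hAeq]
      rw [List.append_assoc] at hA' ⊢
      rw [hA']
      simp [List.map_append]
    · simp only [List.foldl_cons]
      rw [hBeq, hB']
      simp [List.append_assoc]
    · intro x hx
      rcases List.mem_append.mp hx with h1 | h2
      · obtain ⟨a, b, cc⟩ := hLc x h1
        exact ⟨a, b, hm' x cc⟩
      · exact hL' x h2
    · rw [hl', hlc]; simp; omega

-- if the last index sits in the current level, A returns the current depth
lemma levelHit (nums : List Int) (d : Int) :
    ∀ (F : List Int) (g : Nat) (qrest : List (Int × Int))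
      (vis : PySem.Set Int) (seen : List Bool) (γ : PySem.Dict Int (List Int)),
    RelVS nums vis seen → GInvP nums seen γ →
    (∀ c ∈ F, 0 ≤ c ∧ c < (nums.length : Int) ∧ vis.contains c = true) →
    ((nums.length : Int) - 1) ∈ F →
    bfsA nums (nums.length : Int) (primesOf nums) (F.length + g)
        (F.map (fun c => (c, d)) ++ qrest) vis = d := by
  intro F
  induction F with
  | nil =>
    intro g qrest vis seen γ _ _ _ hmem
    exact absurd hmem (by simp)
  | cons c F' ih =>
    intro g qrest vis seen γ hR hG hF hmem
    obtain ⟨hc0, hclt, hcv⟩ := hF c (by simp)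
    have hfuel : (c :: F').length + g = (F'.length + g) + 1 := by
      simp only [List.length_cons]; omega
    rw [hfuel]
    simp only [List.map_cons, List.cons_append, bfsA]
    by_cases hc : c = (nums.length : Int) - 1
    · rw [if_pos hc]
    · rw [if_neg hc]
      obtain ⟨Lc, vis1, seen1, hAeq, hBeq, hR1, hG1, hm1, hLc, hlc⟩ :=
        step_eq nums d c (F'.map (fun x => (x, d)) ++ qrest) [] vis seen γ hR hG hc0 hclt hcv
      rw [hAeq]
      have hmem' : ((nums.length : Int) - 1) ∈ F' := by
        rcases List.mem_cons.mp hmem with h | h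
        · exact absurd h.symm hc
        · exact h
      have := ih g (qrest ++ Lc.map (fun x => (x, d + 1))) vis1 seen1
        (if is_prime (PySem.List.pyGetD nums c 0) then
          γ.insert (PySem.List.pyGetD nums c 0) [] else γ)
        hR1 hG1
        (fun x hx => by
          obtain ⟨a, b, cc⟩ := hF x (by simp [hx])
          exact ⟨a, b, hm1 x cc⟩)
        hmem'
      rw [← List.append_assoc] at this
      exact this

lemma bfsA_nil (nums : List Int) (n : Int) (p : PySem.Set Int) (g : Nat) (vis : PySem.Set Int) :
    bfsA nums n p g [] vis = -1 := by
  cases g <;> rfl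

-- stage 1 of B really stores the full target list for every prime value of nums
lemma build_spec (nums : List Int) (seen : List Bool) :
    GInvP nums seen (buildGroups nums (nums.length : Int)) := by
  have aux : ∀ (l : List Int) (γ : PySem.Dict Int (List Int)),
      (∀ w lr, γ.get? w = some lr → is_prime w = true ∧ lr = tgtList nums (nums.length : Int) w) →
      (∀ w lr, (l.foldl (fun γ x => if is_prime x ∧ γ.get? x = none then
          γ.insert x (tgtList nums (nums.length : Int) x) else γ) γ).get? w = some lr →
        is_prime w = true ∧ lr = tgtList nums (nums.length : Int) w) ∧
      (∀ w, γ.get? w ≠ none → (l.foldl (fun γ x => if is_prime x ∧ γ.get? x = none then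
          γ.insert x (tgtList nums (nums.length : Int) x) else γ) γ).get? w ≠ none) ∧
      (∀ w, is_prime w = true → w ∈ l →
        (l.foldl (fun γ x => if is_prime x ∧ γ.get? x = none then
          γ.insert x (tgtList nums (nums.length : Int) x) else γ) γ).get? w ≠ none) := by
    intro l
    induction l with
    | nil =>
      intro γ h
      exact ⟨fun w lr hw => h w lr hw, fun w hw => hw, fun w _ hw => absurd hw (by simp)⟩
    | cons x l ih =>
      intro γ h
      simp only [List.foldl_cons]
      set γ1 := if is_prime x ∧ γ.get? x = none then
        γ.insert x (tgtList nums (nums.length : Int) x) else γ with hγ1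
      have h1 : ∀ w lr, γ1.get? w = some lr →
          is_prime w = true ∧ lr = tgtList nums (nums.length : Int) w := by
        intro w lr hw
        rw [hγ1] at hw
        by_cases hx : is_prime x = true ∧ γ.get? x = none
        · rw [if_pos hx, PySem.Dict.get?_insert] at hw
          by_cases hwx : w = x
          · rw [if_pos hwx] at hw
            subst hwx
            exact ⟨hx.1, (Option.some.injEq _ _ ▸ hw).symm⟩
          · rw [if_neg hwx] at hw
            exact h w lr hw
        · rw [if_neg hx] at hw
          exact h w lr hw
      have hkeep : ∀ w, γ.get? w ≠ none → γ1.get? w ≠ none := by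
        intro w hw
        rw [hγ1]
        by_cases hx : is_prime x = true ∧ γ.get? x = none
        · rw [if_pos hx, PySem.Dict.get?_insert]
          by_cases hwx : w = x
          · rw [if_pos hwx]; simp
          · rw [if_neg hwx]; exact hw
        · rw [if_neg hx]; exact hw
      obtain ⟨a, b, c⟩ := ih γ1 h1
      refine ⟨a, fun w hw => b w (hkeep w hw), ?_⟩
      intro w hwp hwmem
      rcases List.mem_cons.mp hwmem with rfl | hmem
      · refine b w ?_
        rw [hγ1]
        by_cases hx : is_prime w = true ∧ γ.get? w = none
        · rw [if_pos hx, PySem.Dict.get?_insert_self]; simp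
        · rw [if_neg hx]
          intro hnone
          exact hx ⟨hwp, hnone⟩
      · exact c w hwp hmem
  obtain ⟨a, -, c⟩ := aux nums PySem.Dict.empty
    (fun w lr hw => by rw [PySem.Dict.get?_empty] at hw; cases hw)
  constructor
  · intro v l hget
    exact (a v l hget).1
  intro v hv hvmem
  have hne := c v hv hvmem
  unfold buildGroups
  cases hget : (nums.foldl (fun γ x => if is_prime x ∧ γ.get? x = none then
      γ.insert x (tgtList nums (nums.length : Int) x) else γ) PySem.Dict.empty).get? v with
  | none => exact absurd hget hne
  | some l => exact ⟨l, rfl, Or.inl (a v l hget).2⟩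

-- the two loops in lockstep, level by level
lemma main_lock (nums : List Int) :
    ∀ (fB : Nat) (F : List Int) (d : Int) (gA : Nat) (vis : PySem.Set Int)
      (seen : List Bool) (γ : PySem.Dict Int (List Int)),
    RelVS nums vis seen → GInvP nums seen γ →
    (∀ c ∈ F, 0 ≤ c ∧ c < (nums.length : Int) ∧ vis.contains c = true) →
    nums.length - vis.length + 1 ≤ gA → nums.length - vis.length + 2 ≤ fB →
    bfsA nums (nums.length : Int) (primesOf nums) (F.length + gA)
        (F.map (fun c => (c, d))) vis
      = bfsLvl nums (nums.length : Int) fB F d seen γ := by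
  intro fB
  induction fB with
  | zero =>
    intro F d gA vis seen γ _ _ _ _ hfB
    omega
  | succ f ih =>
    intro F d gA vis seen γ hR hG hF hgA hfB
    cases F with
    | nil =>
      simp only [bfsLvl]
      simp only [List.map_nil, List.length_nil, Nat.zero_add]
      exact bfsA_nil nums (nums.length : Int) (primesOf nums) gA vis
    | cons c F' =>
      by_cases hmem : ((nums.length : Int) - 1) ∈ c :: F'
      · have hB : bfsLvl nums (nums.length : Int) (f + 1) (c :: F') d seen γ = d := by
          simp only [bfsLvl]
          rw [if_pos hmem]
        rw [hB]
        have := levelHit nums d (c :: F') gA [] vis seen γ hR hG hF hmem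
        simpa using this
      · obtain ⟨L, vis', seen', γ', hA, hBf, hR', hG', hm', hL', hl'⟩ :=
          level nums d (c :: F') gA [] [] vis seen γ hR hG hF hmem
        simp only [List.append_nil, List.nil_append] at hA hBf
        have hBstep : bfsLvl nums (nums.length : Int) (f + 1) (c :: F') d seen γ
            = bfsLvl nums (nums.length : Int) f L (d + 1) seen' γ' := by
          simp only [bfsLvl]
          rw [if_neg hmem, hBf]
        rw [hBstep, hA]
        have hvle' : vis'.length ≤ nums.length := vis_le nums vis' seen' hR'
        cases L with
        | nil =>
          have hf1 : 1 ≤ f := by omega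
          obtain ⟨f', rfl⟩ : ∃ f', f = f' + 1 := ⟨f - 1, by omega⟩
          simp only [List.map_nil, bfsLvl]
          exact bfsA_nil nums (nums.length : Int) (primesOf nums) gA vis'
        | cons c' L' =>
          have hlen1 : 1 ≤ (c' :: L').length := by simp
          have hsplit : gA = (c' :: L').length + (gA - (c' :: L').length) := by omega
          rw [hsplit]
          exact ih (c' :: L') (d + 1) (gA - (c' :: L').length) vis' seen' γ'
            hR' hG' hL' (by omega) (by omega)

-- ===== VERDICT (by name: the statement is the Claim_ definition above) =====
theorem solve_spec : Claim_equal_solve := by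
  unfold Claim_equal_solve Spec_solve
  intro nums _
  by_cases hn : nums.length = 0
  · have hnil : nums = [] := List.length_eq_zero_iff.mp hn
    subst hnil
    decide
  · unfold solve solve_alt
    rw [if_neg hn]
    have hofl : PySem.Set.ofList [(0 : Int)] = [0] := rfl
    have hRel : RelVS nums (PySem.Set.ofList [0])
        (PySem.List.pySetD (List.replicate nums.length false) 0 true) := by
      refine ⟨by rw [PySem.List.length_pySetD, List.length_replicate], ?_, ?_, ?_⟩
      · intro j hj0 hjlt
        have hlt0 : (0 : Int) < ((List.replicate nums.length false).length : Int) := by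
          rw [List.length_replicate]; omega
        rw [getD_set _ 0 j le_rfl hlt0 hj0, hofl]
        by_cases hj : j = 0
        · subst hj; simp [PySem.Set.contains]
        · simp only [hj, if_false, PySem.Set.contains, List.contains_cons, List.contains_nil,
            Bool.or_false]
          have : PySem.List.pyGetD (List.replicate nums.length false) j false = false := by
            rw [PySem.List.pyGetD_eq_getElem _ _ hj0 (by rw [List.length_replicate]; exact hjlt)]
            simp
          rw [this]
          simp [hj]
      · rw [hofl]; simp
      · rw [hofl]
        intro x hx
        rcases List.mem_singleton.mp hx with rfl
        exact ⟨le_rfl, by omega⟩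
    have hF : ∀ c ∈ [(0 : Int)], 0 ≤ c ∧ c < (nums.length : Int) ∧
        (PySem.Set.ofList [0]).contains c = true := by
      intro c hc
      rcases List.mem_singleton.mp hc with rfl
      exact ⟨le_rfl, by omega, by rw [hofl]; rfl⟩
    have hfuel : nums.length + 2 = [(0 : Int)].length + (nums.length + 1) := by simp; omega
    have hvlen : (PySem.Set.ofList [(0 : Int)]).length = 1 := by rw [hofl]; rfl
    have hmain := main_lock nums (nums.length + 2) [0] 0 (nums.length + 1)
      (PySem.Set.ofList [0]) (PySem.List.pySetD (List.replicate nums.length false) 0 true)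
      (buildGroups nums (nums.length : Int)) hRel
      (build_spec nums _) hF (by rw [hvlen]; omega) (by rw [hvlen]; omega)
    conv_lhs => rw [hfuel]
    simpa using hmain
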